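-- pv_equiv track=rewrite | github.com/capmichal/aoc2023 | day7/solution.py | categorize_hand
-- ===== SOURCE A (Python) =====
-- order_character = ["A", "K", "Q", "T", "9", "8", "7", "6", "5", "4", "3", "2", "J"]
--
-- def categorize_hand(hand):
--
--     # counting original characters in hand
--     hand_counter = {}
--     for symbol in hand:
--         if symbol not in hand_counter:
--             hand_counter[symbol] = hand.count(symbol) # useful method list.count(character)
--
--     # sorting original hand to find out TO which character to switch using J wild card
--     sorted_hand_counter = dict(sorted(hand_counter.items(),
--                                       key=lambda item: (item[1], [order_character.index(char) for char in item[0]]), reverse=True))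
--
--
--     # switching wild cards to most common character
--     if "J" in hand:
--         most_commmon_character = list(sorted_hand_counter.keys())[0]
--         if (most_commmon_character == "J") and len(list(sorted_hand_counter.keys()))>1:
--             most_commmon_character = list(sorted_hand_counter.keys())[1]
--             new_hand = hand.replace("J", most_commmon_character)
--         else:
--             new_hand = hand.replace("J", most_commmon_character)
--
--         # counting original characters in hand
--         hand_counter = {}
--         for symbol in new_hand:
--             if symbol not in hand_counter:
--                 hand_counter[symbol] = new_hand.count(symbol) # useful method list.count(character)
--
--     values = sorted(hand_counter.values(), reverse=True)
--
--     # categorize as if wild cards were used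
--     if values[0] == 5:
--         return "five_of_kind"
--     elif values[0] == 4:
--         return "four_of_kind"
--     elif values == [3,2]:
--         return "full_house"
--     elif values[:2] == [3,1]:
--         return "three_of_kind"
--     elif values[:2] == [2,2]:
--         return "two_pair"
--     elif values[:2] == [2,1]:
--         return "one_pair"
--     else:
--         return "high_card"
-- ===== SOURCE B (Python) =====
-- order_character = ["A", "K", "Q", "T", "9", "8", "7", "6", "5", "4", "3", "2", "J"]
--
-- def categorize_hand(hand):
--     # One pass over a fixed 13-slot count array indexed by card order; J's slot is last.
--     counts = [0] * 13
--     for ch in hand: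
--         counts[order_character.index(ch)] += 1
--     jcount = counts[12]
--     values = sorted((v for v in counts[:12] if v), reverse=True)
--     if jcount:
--         if values:
--             values[0] += jcount
--         else:
--             values = [jcount]
--     if values[0] == 5:
--         return "five_of_kind"
--     elif values[0] == 4:
--         return "four_of_kind"
--     elif values == [3, 2]:
--         return "full_house"
--     elif values[:2] == [3, 1]:
--         return "three_of_kind"
--     elif values[:2] == [2, 2]:
--         return "two_pair"
--     elif values[:2] == [2, 1]:
--         return "one_pair"
--     else:
--         return "high_card"
-- ===== Notes on version B (the rewrite author's own statement) =====
-- stated objective: simpler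
-- what changed: B makes one counting pass into a fixed 13-slot array indexed by card order (J in the last slot), then adds the J count to the largest sorted non-J count, replacing A's whole-string recounts, card-order sort of the counter dict, string replace and second counting loop; the classification ladder is unchanged.
import Mathlib
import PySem

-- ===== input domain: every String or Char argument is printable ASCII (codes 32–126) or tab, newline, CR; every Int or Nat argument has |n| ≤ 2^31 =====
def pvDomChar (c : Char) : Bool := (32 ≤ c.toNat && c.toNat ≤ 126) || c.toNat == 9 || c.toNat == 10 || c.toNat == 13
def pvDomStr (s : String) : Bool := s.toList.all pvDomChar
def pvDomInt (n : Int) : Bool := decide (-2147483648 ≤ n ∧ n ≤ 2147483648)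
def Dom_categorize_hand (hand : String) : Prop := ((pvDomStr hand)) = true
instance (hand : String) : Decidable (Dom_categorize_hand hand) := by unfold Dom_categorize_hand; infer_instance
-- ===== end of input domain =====

-- B replaces A's count-everything / sort-by-card-order / replace-and-recount pipeline by one counting
-- pass into a fixed 13-slot array indexed by card order (J last), adding the J count to the top
-- non-J count; simpler, same results and the same raising behaviour outside Pre_.

-- ===== PORT A =====
def order_character : List Char := ['A', 'K', 'Q', 'T', '9', '8', '7', '6', '5', '4', '3', '2', 'J']

-- Python iterates the hand as length-1 strings; ported as Char. The sort key's second component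
-- [order_character.index(char)] is a one-element list; comparing those singleton lists lexicographically
-- is comparing the indices, so the key is ported as the lexicographic pair (count, index) — exact.
-- order_character.index raises ValueError outside the card alphabet; those hands are outside Pre_
-- (index? is none there; the .getD 0 is never reached inside Pre_).
def aKey (it : Char × Int) : Lex (Int × Int) :=
  toLex (it.2, ((PySem.List.index? order_character it.1).getD 0 : Int))

-- the counting loop A runs twice: for symbol in l: if symbol not in d: d[symbol] = l0.count(symbol)
-- (str.count with a one-character needle; l0 is the string being counted, equal to l at both call sites)
def aCounter (l0 l : List Char) (d : PySem.Dict Char Int) : PySem.Dict Char Int :=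
  l.foldl (fun d symbol =>
    if d.contains symbol then d
    else d.insert symbol ((PySem.Chars.count l0 [symbol] : Int))) d

def categorize_hand (hand : String) : String :=
  let l := hand.toList
  let hand_counter := aCounter l l PySem.Dict.empty
  let sorted_hand_counter := PySem.Dict.ofList (PySem.List.sorted hand_counter.items aKey true)
  let hand_counter :=
    if l.contains 'J' then
      let keys := sorted_hand_counter.keys
      let most := PySem.List.pyGetD keys 0 ' '   -- list(keys)[0]; nonempty since 'J' is in the hand
      let most := if most == 'J' && decide (1 < keys.length) then PySem.List.pyGetD keys 1 ' ' else most
      let new_hand := PySem.Chars.replace l ['J'] [most]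
      aCounter new_hand new_hand PySem.Dict.empty
    else hand_counter
  let values := PySem.List.sorted hand_counter.values (fun v => v) true
  let v0 := PySem.List.pyGetD values 0 0   -- values[0]: IndexError on the empty hand, excluded by Pre_
  if v0 == 5 then "five_of_kind"
  else if v0 == 4 then "four_of_kind"
  else if values == [3, 2] then "full_house"
  else if PySem.List.slice values none (some 2) == [3, 1] then "three_of_kind"
  else if PySem.List.slice values none (some 2) == [2, 2] then "two_pair"
  else if PySem.List.slice values none (some 2) == [2, 1] then "one_pair"
  else "high_card"

-- ===== PORT B =====
def categorize_hand_alt (hand : String) : String :=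
  -- counts[order_character.index(ch)] += 1; order_character.index raises ValueError outside the
  -- card alphabet (index? = none there — outside Pre_, where the skip branch is never reached)
  let counts := hand.toList.foldl (fun (counts : List Int) ch =>
      match PySem.List.index? order_character ch with
      | some i => PySem.List.pySetD counts (i : Int) (PySem.List.pyGetD counts (i : Int) 0 + 1)
      | none => counts)
    (List.replicate 13 (0 : Int))
  let jcount := PySem.List.pyGetD counts 12 0
  let values := PySem.List.sorted ((PySem.List.slice counts none (some 12)).filter (fun v => v != 0)) (fun v => v) true
  let values := if jcount != 0 then
      match values with
      | [] => [jcount]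
      | v :: t => (v + jcount) :: t   -- values[0] += jcount
    else values
  let v0 := PySem.List.pyGetD values 0 0   -- values[0]: IndexError on the empty hand, excluded by Pre_
  if v0 == 5 then "five_of_kind"
  else if v0 == 4 then "four_of_kind"
  else if values == [3, 2] then "full_house"
  else if PySem.List.slice values none (some 2) == [3, 1] then "three_of_kind"
  else if PySem.List.slice values none (some 2) == [2, 2] then "two_pair"
  else if PySem.List.slice values none (some 2) == [2, 1] then "one_pair"
  else "high_card"

-- ===== PRECONDITION & SPEC =====
-- Pre_ excludes exactly the inputs on which A raises: the empty hand (IndexError on values[0]) and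
-- hands containing a character outside the 13-card alphabet (ValueError from order_character.index).
def Pre_categorize_hand (hand : String) : Prop :=
  hand.toList ≠ [] ∧
    hand.toList.all (fun c => (['A', 'K', 'Q', 'T', '9', '8', '7', '6', '5', '4', '3', '2', 'J'] : List Char).contains c) = true
instance (hand : String) : Decidable (Pre_categorize_hand hand) := by unfold Pre_categorize_hand; infer_instance

def pvWitness_categorize_hand : String := "32T3K"

def Spec_categorize_hand (hand : String) (out : String) : Prop := out = categorize_hand_alt hand
instance (hand : String) (out : String) : Decidable (Spec_categorize_hand hand out) := by unfold Spec_categorize_hand; infer_instance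

-- ===== CLAIM (what is proved, stated in full; the proofs are below) =====
def Claim_equal_categorize_hand : Prop := ∀ (hand : String), Dom_categorize_hand hand → Pre_categorize_hand hand → Spec_categorize_hand hand (categorize_hand hand)

-- ===== LEMMAS AND PROOFS =====

-- the classification ladder both ports end with, as a function of the sorted values list (proof helper)
def ladder (values : List Int) : String :=
  let v0 := PySem.List.pyGetD values 0 0
  if v0 == 5 then "five_of_kind"
  else if v0 == 4 then "four_of_kind"
  else if values == [3, 2] then "full_house"
  else if PySem.List.slice values none (some 2) == [3, 1] then "three_of_kind"
  else if PySem.List.slice values none (some 2) == [2, 2] then "two_pair"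
  else if PySem.List.slice values none (some 2) == [2, 1] then "one_pair"
  else "high_card"

-- A's values list (proof helper; definitionally A's computation)
def aValues (l : List Char) : List Int :=
  let hand_counter := aCounter l l PySem.Dict.empty
  let sorted_hand_counter := PySem.Dict.ofList (PySem.List.sorted hand_counter.items aKey true)
  let hand_counter :=
    if l.contains 'J' then
      let keys := sorted_hand_counter.keys
      let most := PySem.List.pyGetD keys 0 ' '
      let most := if most == 'J' && decide (1 < keys.length) then PySem.List.pyGetD keys 1 ' ' else most
      let new_hand := PySem.Chars.replace l ['J'] [most]
      aCounter new_hand new_hand PySem.Dict.empty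
    else hand_counter
  PySem.List.sorted hand_counter.values (fun v => v) true

-- the replacement character A picks (proof helper; definitionally A's computation)
def aMost (l : List Char) : Char :=
  let keys := (PySem.Dict.ofList (PySem.List.sorted (aCounter l l PySem.Dict.empty).items aKey true)).keys
  let most := PySem.List.pyGetD keys 0 ' '
  if most == 'J' && decide (1 < keys.length) then PySem.List.pyGetD keys 1 ' ' else most

-- B's count array (proof helper; definitionally B's computation)
def bCounts (l : List Char) : List Int :=
  l.foldl (fun (counts : List Int) ch =>
      match PySem.List.index? order_character ch with
      | some i => PySem.List.pySetD counts (i : Int) (PySem.List.pyGetD counts (i : Int) 0 + 1)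
      | none => counts)
    (List.replicate 13 (0 : Int))

-- B's values list (proof helper; definitionally B's computation)
def bValues (l : List Char) : List Int :=
  let counts := bCounts l
  let jcount := PySem.List.pyGetD counts 12 0
  let values := PySem.List.sorted ((PySem.List.slice counts none (some 12)).filter (fun v => v != 0)) (fun v => v) true
  if jcount != 0 then
    match values with
    | [] => [jcount]
    | v :: t => (v + jcount) :: t
  else values

theorem categorize_hand_eq_ladder (hand : String) :
    categorize_hand hand = ladder (aValues hand.toList) := rfl

theorem categorize_hand_alt_eq_ladder (hand : String) :
    categorize_hand_alt hand = ladder (bValues hand.toList) := rfl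

theorem aValues_noJ (l : List Char) (h : l.contains 'J' = false) :
    aValues l = PySem.List.sorted (aCounter l l PySem.Dict.empty).values (fun v => v) true := by
  unfold aValues; rw [h]; rfl

theorem aValues_J (l : List Char) (h : l.contains 'J' = true) :
    aValues l = PySem.List.sorted
      (aCounter (PySem.Chars.replace l ['J'] [aMost l]) (PySem.Chars.replace l ['J'] [aMost l])
        PySem.Dict.empty).values (fun v => v) true := by
  unfold aValues aMost; rw [h]; rfl

-- one step of B's counting loop on a map over the (nodup) card list bumps one card's count
theorem bStep_map (f : Char → Int) (ch : Char) (i : Nat)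
    (hi : PySem.List.index? order_character ch = some i) :
    PySem.List.pySetD (order_character.map f) (i : Int)
        (PySem.List.pyGetD (order_character.map f) (i : Int) 0 + 1)
      = order_character.map (fun c => if c = ch then f c + 1 else f c) := by
  obtain ⟨hk, hoc, _⟩ := PySem.List.getElem_of_index?_eq_some hi
  have hnd : order_character.Nodup := by decide
  have hget : PySem.List.pyGetD (order_character.map f) (i : Int) 0 = f ch := by
    rw [PySem.List.pyGetD_natCast, List.getD_eq_getElem _ _ (by simpa using hk),
        List.getElem_map, hoc]
  rw [hget, PySem.List.pySetD_natCast]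
  apply List.ext_getElem
  · simp
  · intro j hj1 hj2
    have hjlen : j < order_character.length := by simpa using hj2
    rw [List.getElem_set, List.getElem_map, List.getElem_map]
    by_cases hji : i = j
    · subst hji
      rw [if_pos rfl, hoc, if_pos rfl]
    · rw [if_neg hji]
      have : order_character[j] ≠ ch := fun h =>
        hji ((List.Nodup.getElem_inj_iff hnd).mp (hoc.trans h.symm))
      rw [if_neg this]

-- B's counting loop, run from any map over the card list
theorem bCounts_foldl (l : List Char) :
    ∀ (f : Char → Int), (∀ c ∈ l, c ∈ order_character) →
      l.foldl (fun (counts : List Int) ch =>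
          match PySem.List.index? order_character ch with
          | some i => PySem.List.pySetD counts (i : Int) (PySem.List.pyGetD counts (i : Int) 0 + 1)
          | none => counts)
        (order_character.map f)
      = order_character.map (fun c => f c + (l.count c : Int)) := by
  induction l with
  | nil =>
    intro f _
    simp
  | cons ch t ih =>
    intro f halpha
    have hmem : ch ∈ order_character := halpha ch List.mem_cons_self
    obtain ⟨i, hi⟩ := Option.isSome_iff_exists.mp
      ((PySem.List.index?_isSome_iff order_character ch).mpr hmem)
    rw [List.foldl_cons]
    have hstep : (match PySem.List.index? order_character ch with
        | some i => PySem.List.pySetD (order_character.map f) (i : Int)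
            (PySem.List.pyGetD (order_character.map f) (i : Int) 0 + 1)
        | none => order_character.map f)
        = order_character.map (fun c => if c = ch then f c + 1 else f c) := by
      rw [hi]
      exact bStep_map f ch i hi
    rw [hstep, ih _ (fun c hc => halpha c (List.mem_cons_of_mem _ hc))]
    apply List.map_congr_left
    intro c _
    by_cases hc : c = ch
    · subst hc
      rw [if_pos rfl, List.count_cons_self]
      push_cast
      ring
    · rw [if_neg hc, List.count_cons_of_ne (fun h => hc h.symm)]

theorem bCounts_eq (l : List Char) (halpha : ∀ c ∈ l, c ∈ order_character) :
    bCounts l = order_character.map (fun c => (l.count c : Int)) := by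
  unfold bCounts
  have hbase : (List.replicate 13 (0 : Int)) = order_character.map (fun _ => (0 : Int)) := by
    decide
  rw [hbase, bCounts_foldl l (fun _ => 0) halpha]
  simp

-- reverse-sorting (no key) is invariant under permutation
theorem sortedRev_eq_of_perm (xs ys : List Int) (h : xs.Perm ys) :
    PySem.List.sorted xs (fun v => v) true = PySem.List.sorted ys (fun v => v) true := by
  apply PySem.List.eq_of_perm_of_pairwise_le_of_injective (fun v : Int => -v) neg_injective
  · exact ((PySem.List.sorted_perm xs _ true).trans h).trans (PySem.List.sorted_perm ys _ true).symm
  · exact (PySem.List.sorted_pairwise_rev xs (fun v => v)).imp (fun hab => by omega)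
  · exact (PySem.List.sorted_pairwise_rev ys (fun v => v)).imp (fun hab => by omega)

-- B's values list, characterized: non-J counts reverse-sorted, J count added on top
theorem bValues_def (l : List Char) (halpha : ∀ c ∈ l, c ∈ order_character) :
    bValues l =
      (if ((l.count 'J' : Int) != 0) then
        match PySem.List.sorted
            ((PySem.List.dedup (l.filter (fun ch => decide ¬(ch = 'J')))).map
              (fun c => (l.count c : Int))) (fun v => v) true with
        | [] => [(l.count 'J' : Int)]
        | v :: t => (v + (l.count 'J' : Int)) :: t
      else PySem.List.sorted
        ((PySem.List.dedup (l.filter (fun ch => decide ¬(ch = 'J')))).map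
          (fun c => (l.count c : Int))) (fun v => v) true) := by
  unfold bValues
  rw [bCounts_eq l halpha]
  set cnt : Char → Int := fun c => (l.count c : Int) with hcnt
  have hj : PySem.List.pyGetD (order_character.map cnt) 12 0 = cnt 'J' := by
    show PySem.List.pyGetD (order_character.map cnt) ((12 : Nat) : Int) 0 = cnt 'J'
    rw [PySem.List.pyGetD_natCast, List.getD_eq_getElem _ _ (by simp [order_character]),
        List.getElem_map]
    congr 1
  have hsl : PySem.List.slice (order_character.map cnt) none (some 12) = (order_character.take 12).map cnt := by
    show PySem.List.slice (order_character.map cnt) none (some ((12 : Nat) : Int)) = _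
    rw [PySem.List.slice_to_natCast, List.map_take]
  have hfm : ((order_character.take 12).map cnt).filter (fun v => v != 0)
      = ((order_character.take 12).filter (fun c => cnt c != 0)).map cnt := by
    rw [List.filter_map]
    rfl
  have hperm : ((order_character.take 12).filter (fun c => cnt c != 0)).Perm
      (PySem.List.dedup (l.filter (fun ch => decide ¬(ch = 'J')))) := by
    rw [List.perm_ext_iff_of_nodup
      (List.Nodup.filter _ (by decide)) (PySem.List.nodup_dedup _)]
    intro c
    rw [List.mem_filter, PySem.List.mem_dedup, List.mem_filter]
    constructor
    · rintro ⟨h12, hcnt0⟩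
      have hcl : c ∈ l := by
        rw [hcnt] at hcnt0
        simp only [bne_iff_ne, Ne] at hcnt0
        have : l.count c ≠ 0 := by
          intro h
          exact hcnt0 (by exact_mod_cast h)
        exact List.count_pos_iff.mp (Nat.pos_of_ne_zero this)
      have hcJ : c ≠ 'J' := by
        intro h
        subst h
        revert h12
        decide
      exact ⟨hcl, by simp [hcJ]⟩
    · rintro ⟨hcl, hcJ'⟩
      have hcJ : c ≠ 'J' := by simpa using hcJ'
      have hoc : c ∈ order_character := halpha c hcl
      have hsplit : order_character = order_character.take 12 ++ ['J'] := by decide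
      have h12 : c ∈ order_character.take 12 := by
        rcases List.mem_append.mp (hsplit ▸ hoc) with h | h
        · exact h
        · exact absurd (List.mem_singleton.mp h) hcJ
      refine ⟨h12, ?_⟩
      have : l.count c ≠ 0 := by
        rw [Ne, List.count_eq_zero]
        exact fun h => h hcl
      simp only [hcnt, bne_iff_ne, Ne]
      intro h
      exact this (by exact_mod_cast h)
  simp only [hj, hsl, hfm, sortedRev_eq_of_perm _ _ (hperm.map cnt)]
  rw [hcnt]

-- str.count with a one-character needle is List.count
theorem chars_count_go_single (a : Char) :
    ∀ (t : List Char) (fuel : Nat) (acc : Nat), t.length ≤ fuel →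
      PySem.Chars.count.go [a] fuel t acc = acc + t.count a := by
  intro t
  induction t with
  | nil =>
    intro fuel acc _
    cases fuel with
    | zero => show acc = acc + List.count a []; simp
    | succ n => show acc = acc + List.count a []; simp
  | cons c t ih =>
    intro fuel acc hle
    cases fuel with
    | zero => simp at hle
    | succ n =>
      have hstep : PySem.Chars.count.go [a] (n + 1) (c :: t) acc
          = if ([a].isPrefixOf (c :: t)) then PySem.Chars.count.go [a] n ((c :: t).drop 1) (acc + 1)
            else PySem.Chars.count.go [a] n t acc := rfl
      have hlen : t.length ≤ n := Nat.le_of_succ_le_succ (by simpa using hle)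
      by_cases h : a = c
      · have hp : ([a].isPrefixOf (c :: t)) = true := by simp [List.isPrefixOf, h]
        rw [hstep, hp, if_pos rfl]
        rw [show (c :: t).drop 1 = t from rfl, ih n (acc + 1) hlen]
        simp [h]
        omega
      · have hp : ([a].isPrefixOf (c :: t)) = false := by
          simp [List.isPrefixOf]
          exact fun hh => (h hh).elim
        rw [hstep, hp]
        simp only [Bool.false_eq_true, if_false]
        rw [ih n acc hlen]
        have : c ≠ a := fun hh => h hh.symm
        simp [this]

theorem chars_count_single (l : List Char) (a : Char) :
    PySem.Chars.count l [a] = l.count a := by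
  show PySem.Chars.count.go [a] l.length l 0 = l.count a
  rw [chars_count_go_single a l l.length 0 le_rfl]
  simp

-- str.replace with a one-character needle and replacement is a map
theorem chars_replace_go_single (a b : Char) :
    ∀ (t : List Char) (fuel : Nat) (acc : List Char), t.length ≤ fuel →
      PySem.Chars.replace.go [a] [b] fuel t acc
        = acc.reverse ++ t.map (fun c => if c = a then b else c) := by
  intro t
  induction t with
  | nil =>
    intro fuel acc _
    cases fuel with
    | zero => show acc.reverse ++ [] = acc.reverse ++ List.map _ []; simp
    | succ n => show acc.reverse = acc.reverse ++ List.map _ []; simp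
  | cons c t ih =>
    intro fuel acc hle
    cases fuel with
    | zero => simp at hle
    | succ n =>
      have hstep : PySem.Chars.replace.go [a] [b] (n + 1) (c :: t) acc
          = if ([a].isPrefixOf (c :: t)) then
              PySem.Chars.replace.go [a] [b] n ((c :: t).drop 1) ([b].reverse ++ acc)
            else PySem.Chars.replace.go [a] [b] n t (c :: acc) := rfl
      have hlen : t.length ≤ n := Nat.le_of_succ_le_succ (by simpa using hle)
      by_cases h : c = a
      · have hp : ([a].isPrefixOf (c :: t)) = true := by simp [List.isPrefixOf, h]
        rw [hstep, hp, if_pos rfl, show (c :: t).drop 1 = t from rfl,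
            ih n ([b].reverse ++ acc) hlen]
        simp [h]
      · have hp : ([a].isPrefixOf (c :: t)) = false := by
          simp [List.isPrefixOf]
          exact fun hh => (h hh.symm).elim
        rw [hstep, hp]
        simp only [Bool.false_eq_true, if_false]
        rw [ih n (c :: acc) hlen]
        simp [h]

theorem chars_replace_single (l : List Char) (a b : Char) :
    PySem.Chars.replace l [a] [b] = l.map (fun c => if c = a then b else c) := by
  show PySem.Chars.replace.go [a] [b] l.length l [] = _
  rw [chars_replace_go_single a b l l.length [] le_rfl]
  simp

-- keys of a fold whose step appends a fresh key (A's counting loops have this shape)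
theorem keys_foldl_step (f : PySem.Dict Char Int → Char → PySem.Dict Char Int)
    (hf : ∀ d c, (f d c).keys = if c ∈ d.keys then d.keys else d.keys ++ [c]) :
    ∀ (l : List Char) (d : PySem.Dict Char Int),
      (l.foldl f d).keys = l.foldl PySem.Set.add d.keys := by
  intro l
  induction l with
  | nil => intro d; rfl
  | cons c t ih =>
    intro d
    show (t.foldl f (f d c)).keys = t.foldl PySem.Set.add (PySem.Set.add d.keys c)
    rw [ih (f d c), hf d c]
    congr 1
    by_cases h : c ∈ d.keys <;> simp [PySem.Set.add, h]

theorem aCounter_keys (l0 l : List Char) :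
    (aCounter l0 l PySem.Dict.empty).keys = PySem.List.dedup l := by
  unfold aCounter
  rw [keys_foldl_step _ (fun d c => by
    by_cases h : c ∈ d.keys
    · simp [PySem.Dict.contains_eq_decide_mem_keys, h]
    · have hc : d.contains c = false := by simp [PySem.Dict.contains_eq_decide_mem_keys, h]
      rw [hc]
      simp [h, PySem.Dict.keys_insert_of_not_contains d _ hc])]
  rw [PySem.List.dedup_eq_ofList]
  rfl

theorem aCounter_getD (l0 : List Char) :
    ∀ (l : List Char) (d : PySem.Dict Char Int) (c : Char),
      (aCounter l0 l d).getD c 0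
        = if d.contains c then d.getD c 0
          else if c ∈ l then (l0.count c : Int) else 0 := by
  intro l
  induction l with
  | nil =>
    intro d c
    by_cases h : d.contains c
    · simp [aCounter, h]
    · have h0 : d.get? c = none :=
        (PySem.Dict.get?_eq_none_iff_contains d c).mpr (by simpa using h)
      simp [aCounter, h, PySem.Dict.getD, h0]
  | cons s t ih =>
    intro d c
    show (aCounter l0 t (if d.contains s then d else d.insert s ((PySem.Chars.count l0 [s] : Int)))).getD c 0 = _
    by_cases hs : d.contains s
    · rw [if_pos hs, ih]
      by_cases hc : d.contains c
      · simp [hc]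
      · have hcs : c ≠ s := fun h => by rw [h] at hc; exact absurd hs (by simp [hc])
        simp [hc, hcs]
    · rw [if_neg hs, ih]
      by_cases hcs : c = s
      · subst hcs
        simp [chars_count_single, hs]
      · simp only [PySem.Dict.contains_insert, PySem.Dict.getD_insert, if_neg hcs]
        have : (c == s) = false := by simp [hcs]
        simp [this, hcs]

theorem aCounter_values (l : List Char) :
    (aCounter l l PySem.Dict.empty).values
      = (PySem.List.dedup l).map (fun c => (l.count c : Int)) := by
  have hnd : (aCounter l l PySem.Dict.empty).keys.Nodup := by
    rw [aCounter_keys]; exact PySem.List.nodup_dedup l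
  rw [PySem.Dict.values_eq_map_keys _ hnd 0, aCounter_keys]
  apply List.map_congr_left
  intro c hc
  rw [aCounter_getD]
  simp [(PySem.List.mem_dedup l c).mp hc]

theorem aCounter_items (l : List Char) :
    (aCounter l l PySem.Dict.empty).items
      = (PySem.List.dedup l).map (fun c => (c, (l.count c : Int))) := by
  have hnd : (aCounter l l PySem.Dict.empty).keys.Nodup := by
    rw [aCounter_keys]; exact PySem.List.nodup_dedup l
  rw [PySem.Dict.items_eq_map_keys _ hnd 0, aCounter_keys]
  apply List.map_congr_left
  intro c hc
  rw [aCounter_getD]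
  simp [(PySem.List.mem_dedup l c).mp hc]

-- items of dict(ps) for an association list with pairwise distinct keys
theorem items_ofList_of_nodup (ps : List (Char × Int)) (h : (ps.map Prod.fst).Nodup) :
    (PySem.Dict.ofList ps).items = ps := by
  show (ps.foldl (fun acc p => acc.insert p.1 p.2) PySem.Dict.empty).items = ps
  rw [PySem.Dict.items_foldl_insert_fresh ps Prod.fst Prod.snd PySem.Dict.empty
    (fun a _ => PySem.Dict.contains_empty _) h]
  simp [show (PySem.Dict.empty : PySem.Dict Char Int).items = [] from rfl]

-- counting a disjunction of two distinct characters
theorem countP_beq_or (l : List Char) (c₁ c₂ : Char) (h : c₁ ≠ c₂) :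
    l.countP (fun x => x == c₁ || x == c₂) = l.count c₁ + l.count c₂ := by
  induction l with
  | nil => simp
  | cons x t ih =>
    by_cases h1 : x = c₁ <;> by_cases h2 : x = c₂ <;>
      simp_all <;> omega

-- counts after A's wild-card substitution
theorem count_replaceJ (l : List Char) (cstar : Char) (hs : cstar ≠ 'J') (c : Char) (hc : c ≠ 'J') :
    (l.map (fun x => if x = 'J' then cstar else x)).count c
      = if c = cstar then l.count c + l.count 'J' else l.count c := by
  rw [List.count_eq_countP, List.countP_map]
  by_cases hcc : c = cstar
  · subst hcc
    rw [if_pos rfl, ← countP_beq_or l c 'J' hc]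
    apply List.countP_congr
    intro x _
    by_cases hx : x = 'J'
    · simp [Function.comp, hx]
    · by_cases hxc : x = c <;> simp [Function.comp, hx, hxc]
  · rw [if_neg hcc, List.count_eq_countP]
    apply List.countP_congr
    intro x _
    by_cases hx : x = 'J'
    · subst hx
      simp [Function.comp]
      constructor
      · intro hh; exact absurd hh.symm hcc
      · intro hh; exact absurd hh.symm hc
    · simp [Function.comp, hx]

-- the bump lemma: adding j ≥ 0 to a maximal column commutes with reverse sorting
theorem sorted_bump (S : List Char) (cnt : Char → Int) (cstar : Char) (j : Int)
    (hmem : cstar ∈ S) (hnd : S.Nodup) (hj : 0 ≤ j)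
    (hmax : ∀ c ∈ S, cnt c ≤ cnt cstar)
    {v0 : Int} {t : List Int}
    (hs : PySem.List.sorted (S.map cnt) (fun v => v) true = v0 :: t) :
    PySem.List.sorted (S.map (fun c => if c = cstar then cnt c + j else cnt c)) (fun v => v) true
      = (v0 + j) :: t := by
  set newcnt := fun c => if c = cstar then cnt c + j else cnt c with hnc
  have hperm : (v0 :: t).Perm (S.map cnt) := hs ▸ PySem.List.sorted_perm (S.map cnt) _ true
  have hpe : S.Perm (cstar :: S.erase cstar) := List.perm_cons_erase hmem
  have herase : (S.erase cstar).map newcnt = (S.erase cstar).map cnt := by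
    apply List.map_congr_left
    intro c hc
    have : c ≠ cstar := ((List.Nodup.mem_erase_iff hnd).mp hc).1
    simp [hnc, this]
  have h1 : (S.map cnt).Perm (cnt cstar :: (S.erase cstar).map cnt) := hpe.map cnt
  have h2 : (S.map newcnt).Perm (newcnt cstar :: (S.erase cstar).map cnt) := by
    have := hpe.map newcnt
    rwa [show (cstar :: S.erase cstar).map newcnt = newcnt cstar :: (S.erase cstar).map cnt by
      simp [herase]] at this
  have hv0max : ∀ y ∈ S.map cnt, y ≤ v0 := by
    intro y hy
    exact PySem.List.key_head_sorted_rev_ge (S.map cnt) (fun v => v) hs y hy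
  have hv0mem : v0 ∈ S.map cnt := hperm.subset (List.mem_cons_self)
  have hv0 : v0 = cnt cstar := by
    obtain ⟨c, hcS, hcv⟩ := List.mem_map.mp hv0mem
    have h1' : v0 ≤ cnt cstar := hcv ▸ hmax c hcS
    have h2' : cnt cstar ≤ v0 := hv0max _ (List.mem_map_of_mem hmem)
    omega
  have ht : t.Perm ((S.erase cstar).map cnt) := by
    have := hperm.trans h1
    rw [hv0] at this
    exact this.cons_inv
  have hpair : List.Pairwise (fun a b : Int => b ≤ a) (v0 :: t) := by
    have := PySem.List.sorted_pairwise_rev (S.map cnt) (fun v => v)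
    rwa [hs] at this
  have hpair' : List.Pairwise (fun a b : Int => b ≤ a) ((v0 + j) :: t) := by
    rw [List.pairwise_cons] at hpair ⊢
    exact ⟨fun y hy => (hpair.1 y hy).trans (by omega), hpair.2⟩
  have hptgt : (S.map newcnt).Perm ((v0 + j) :: t) := by
    have hnst : newcnt cstar = v0 + j := by simp [hnc, hv0]
    exact h2.trans (by rw [hnst]; exact (ht.symm.cons (v0 + j)))
  calc PySem.List.sorted (S.map newcnt) (fun v => v) true
      = PySem.List.sorted ((v0 + j) :: t) (fun v => v) true := sortedRev_eq_of_perm _ _ hptgt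
    _ = (v0 + j) :: t := PySem.List.sorted_rev_eq_self_of_pairwise _ _ hpair'

-- comparing A's lexicographic sort keys compares the counts first
theorem aKey_le_snd {p q : Char × Int} (h : aKey p ≤ aKey q) : p.2 ≤ q.2 := by
  rw [aKey, aKey, Prod.Lex.le_iff] at h
  simp only [ofLex_toLex] at h
  rcases h with h1 | ⟨h1, _⟩
  · exact le_of_lt h1
  · exact le_of_eq h1

-- A's wild-card replacement character: in the hand, not 'J', of maximal count among non-J cards
theorem aMost_spec (l : List Char) (hJ : 'J' ∈ l) (hnotall : ¬ ∀ c ∈ l, c = 'J') :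
    aMost l ∈ l ∧ aMost l ≠ 'J' ∧
      ∀ c ∈ l, c ≠ 'J' → (l.count c : Int) ≤ (l.count (aMost l) : Int) := by
  classical
  set SI := PySem.List.sorted (aCounter l l PySem.Dict.empty).items aKey true with hSI
  have hsp : SI.Perm (aCounter l l PySem.Dict.empty).items := by
    rw [hSI]; exact PySem.List.sorted_perm _ aKey true
  have hshape : ∀ it ∈ SI, it.1 ∈ l ∧ it.2 = (l.count it.1 : Int) := by
    intro it hit'
    have h1 : it ∈ (aCounter l l PySem.Dict.empty).items := hsp.subset hit'
    rw [aCounter_items l] at h1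
    obtain ⟨c, hc, rfl⟩ := List.mem_map.mp h1
    exact ⟨(PySem.List.mem_dedup l c).mp hc, rfl⟩
  have hmemsi : ∀ c ∈ l, (c, (l.count c : Int)) ∈ SI := by
    intro c hc
    rw [hSI, PySem.List.mem_sorted, aCounter_items l]
    exact List.mem_map_of_mem ((PySem.List.mem_dedup l c).mpr hc)
  have hnodup : (SI.map Prod.fst).Nodup := by
    refine (List.Perm.nodup_iff (List.Perm.map Prod.fst hsp)).mpr ?_
    rw [aCounter_items l, List.map_map]
    have hid : (Prod.fst ∘ fun c => (c, (l.count c : Int))) = id := rfl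
    rw [hid, List.map_id]
    exact PySem.List.nodup_dedup l
  have hkeys : (PySem.Dict.ofList SI).keys = SI.map Prod.fst := by
    show (PySem.Dict.ofList SI).items.map Prod.fst = _
    rw [items_ofList_of_nodup SI hnodup]
  have hpw : List.Pairwise (fun a b => aKey b ≤ aKey a) SI := by
    rw [hSI]; exact PySem.List.sorted_pairwise_rev _ aKey
  have hne' : SI ≠ [] := by
    intro h
    rw [hSI, PySem.List.sorted_eq_nil_iff, aCounter_items l] at h
    have hJd := (PySem.List.mem_dedup l 'J').mpr hJ
    rw [List.map_eq_nil_iff.mp h] at hJd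
    exact List.not_mem_nil hJd
  obtain ⟨it0, rest, hcons⟩ := List.exists_cons_of_ne_nil hne'
  have hit0 : it0.1 ∈ l ∧ it0.2 = (l.count it0.1 : Int) :=
    hshape it0 (hcons ▸ List.mem_cons_self)
  have h0 : PySem.List.pyGetD (SI.map Prod.fst) 0 ' ' = it0.1 := by
    rw [hcons]
    simp [PySem.List.pyGetD_ofNat']
  have hlen' : (SI.map Prod.fst).length = SI.length := by simp
  have hAM : aMost l = (if (it0.1 == 'J' && decide (1 < SI.length)) = true
      then PySem.List.pyGetD (SI.map Prod.fst) 1 ' ' else it0.1) := by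
    unfold aMost
    rw [← hSI, hkeys]
    simp only [h0, hlen']
  by_cases hcond : (it0.1 == 'J' && decide (1 < SI.length)) = true
  · -- A picks keys[1]
    have hc' : it0.1 = 'J' ∧ 1 < SI.length := by simpa using hcond
    obtain ⟨it1, rest', hr⟩ : ∃ it1 rest', rest = it1 :: rest' := by
      cases rest with
      | nil => rw [hcons] at hc'; simp at hc'
      | cons a b => exact ⟨a, b, rfl⟩
    have hAM1 : aMost l = it1.1 := by
      rw [hAM, if_pos hcond, hcons, hr]
      simp [PySem.List.pyGetD_ofNat']
    have hit1 : it1 ∈ SI := by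
      rw [hcons, hr]; exact List.mem_cons_of_mem _ List.mem_cons_self
    have hs1 := hshape it1 hit1
    have hne10 : it1.1 ≠ 'J' := by
      rw [hcons, hr] at hnodup
      simp only [List.map_cons, List.nodup_cons] at hnodup
      intro h
      apply hnodup.1
      rw [hc'.1, ← h]
      exact List.mem_cons_self
    have hmax : ∀ c ∈ l, c ≠ 'J' → (l.count c : Int) ≤ (l.count it1.1 : Int) := by
      intro c hc hcne
      have hmem := hmemsi c hc
      rw [hcons, hr] at hmem
      rcases List.mem_cons.mp hmem with h | hmem'
      · exfalso
        apply hcne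
        have hc1 : it0.1 = c := by rw [← h]
        rw [← hc1, hc'.1]
      rcases List.mem_cons.mp hmem' with h | hmem''
      · have hc1 : it1.1 = c := by rw [← h]
        rw [hc1]
      · rw [hcons, hr] at hpw
        have h2 := (List.pairwise_cons.mp hpw).2
        have h3 := (List.pairwise_cons.mp h2).1 _ hmem''
        have h4 := aKey_le_snd h3
        rw [hs1.2] at h4
        exact h4
    exact ⟨by rw [hAM1]; exact hs1.1, by rw [hAM1]; exact hne10,
      fun c hc hcne => by rw [hAM1]; exact hmax c hc hcne⟩
  · -- A keeps keys[0]
    have hAM0 : aMost l = it0.1 := by rw [hAM, if_neg hcond]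
    by_cases h0J : it0.1 = 'J'
    · exfalso
      have hlen : ¬ 1 < SI.length := by
        intro hl
        exact hcond (by simp [h0J, hl])
      have hrest : rest = [] := by
        cases rest with
        | nil => rfl
        | cons a b => rw [hcons] at hlen; simp at hlen
      simp only [not_forall] at hnotall
      obtain ⟨c, hc, hcne⟩ := hnotall
      have h1 := hmemsi c hc
      rw [hcons, hrest] at h1
      simp only [List.mem_singleton] at h1
      exact hcne (by rw [← h0J, ← h1])
    · have hmax : ∀ c ∈ l, c ≠ 'J' → (l.count c : Int) ≤ (l.count it0.1 : Int) := by
        intro c hc _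
        have hmem := hmemsi c hc
        rw [hcons] at hmem
        rcases List.mem_cons.mp hmem with h | hmem'
        · have hc1 : it0.1 = c := by rw [← h]
          rw [hc1]
        · rw [hcons] at hpw
          have h3 := (List.pairwise_cons.mp hpw).1 _ hmem'
          have h4 := aKey_le_snd h3
          rw [hit0.2] at h4
          exact h4
      exact ⟨by rw [hAM0]; exact hit0.1, by rw [hAM0]; exact h0J,
        fun c hc hcne => by rw [hAM0]; exact hmax c hc hcne⟩

-- main: the two values lists agree on Pre_
theorem values_eq (l : List Char) (hne : l ≠ []) (halpha : ∀ c ∈ l, c ∈ order_character) :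
    aValues l = bValues l := by
  classical
  rw [bValues_def l halpha]
  set SB := PySem.List.dedup (l.filter (fun ch => decide ¬(ch = 'J'))) with hSB
  have hSBnd : SB.Nodup := by rw [hSB]; exact PySem.List.nodup_dedup _
  have hSBmem : ∀ c, c ∈ SB ↔ (c ∈ l ∧ c ≠ 'J') := by
    intro c
    rw [hSB, PySem.List.mem_dedup, List.mem_filter]
    simp
  by_cases hJ : 'J' ∈ l
  · have hcontains : l.contains 'J' = true := by simpa using hJ
    have hcJ : l.count 'J' ≠ 0 := by simpa [List.count_eq_zero] using hJ
    have hcount0 : ((l.count 'J' : Int) != 0) = true := by simp [hcJ]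
    rw [hcount0, if_pos rfl]
    by_cases hall : ∀ c ∈ l, c = 'J'
    · -- every card is a wild card
      have hlf : l.filter (fun ch => decide ¬(ch = 'J')) = [] := by
        rw [List.filter_eq_nil_iff]
        intro a ha
        simp [hall a ha]
      have hSBnil : SB = [] := by rw [hSB, hlf]; rfl
      have hBr : PySem.List.sorted (SB.map (fun c => (l.count c : Int))) (fun v => v) true = [] := by
        rw [hSBnil]; rfl
      rw [hBr]
      -- A's side: the hand is all-J, replacement maps every card to aMost l
      rw [aValues_J l hcontains, chars_replace_single, aCounter_values]
      have hnl : l.map (fun c => if c = 'J' then aMost l else c) = List.replicate l.length (aMost l) := by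
        rw [← List.map_const' (l := l) (b := aMost l)]
        apply List.map_congr_left
        intro x hx
        simp [hall x hx]
      rw [hnl]
      have hdd : PySem.List.dedup (List.replicate l.length (aMost l)) = [aMost l] := by
        have hm : aMost l ∈ PySem.List.dedup (List.replicate l.length (aMost l)) := by
          rw [PySem.List.mem_dedup]
          exact List.mem_replicate.mpr ⟨by simpa using hne, rfl⟩
        have hnd := PySem.List.nodup_dedup (List.replicate l.length (aMost l))
        have hall' : ∀ x ∈ PySem.List.dedup (List.replicate l.length (aMost l)), x = aMost l := by
          intro x hx
          exact (List.mem_replicate.mp ((PySem.List.mem_dedup _ x).mp hx)).2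
        rcases hdd' : PySem.List.dedup (List.replicate l.length (aMost l)) with _ | ⟨x, xs⟩
        · rw [hdd'] at hm; exact absurd hm (List.not_mem_nil)
        · rw [hdd'] at hm hnd hall'
          have hx := hall' x List.mem_cons_self
          cases xs with
          | nil => rw [hx]
          | cons y ys =>
            have hy := hall' y (List.mem_cons_of_mem _ List.mem_cons_self)
            rw [List.nodup_cons] at hnd
            exact absurd (by simp [hx, hy] : x ∈ y :: ys) hnd.1
      rw [hdd]
      have hcnt : (List.replicate l.length (aMost l)).count (aMost l) = l.length := by
        simp
      have hcJl : l.count 'J' = l.length := List.count_eq_length.mpr (fun a ha => by simp [hall a ha])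
      simp only [List.map_cons, List.map_nil, hcnt]
      rw [PySem.List.sorted_rev_eq_self_of_pairwise _ _ (List.pairwise_singleton _ _), hcJl]
    · -- there is a non-J card
      obtain ⟨hmL, hmJ, hmax⟩ := aMost_spec l hJ hall
      rw [aValues_J l hcontains, chars_replace_single, aCounter_values]
      have hcsSB : aMost l ∈ SB := (hSBmem (aMost l)).mpr ⟨hmL, hmJ⟩
      have hAcongr : (PySem.List.dedup (l.map (fun x => if x = 'J' then aMost l else x))).map
            (fun c => ((l.map (fun x => if x = 'J' then aMost l else x)).count c : Int))
          = (PySem.List.dedup (l.map (fun x => if x = 'J' then aMost l else x))).map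
            (fun c => if c = aMost l then (l.count c : Int) + (l.count 'J' : Int) else (l.count c : Int)) := by
        apply List.map_congr_left
        intro c hc
        have hcnl : c ∈ l.map (fun x => if x = 'J' then aMost l else x) :=
          (PySem.List.mem_dedup _ c).mp hc
        have hcne : c ≠ 'J' := by
          obtain ⟨x, hx, hfx⟩ := List.mem_map.mp hcnl
          intro h
          by_cases hxJ : x = 'J'
          · rw [hxJ] at hfx; simp at hfx; exact hmJ (by rw [hfx, h])
          · rw [if_neg hxJ] at hfx; exact hxJ (by rw [hfx, h])
        rw [count_replaceJ l (aMost l) hmJ c hcne]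
        split_ifs with h <;> simp
      have hpermA : (PySem.List.dedup (l.map (fun x => if x = 'J' then aMost l else x))).Perm SB := by
        rw [List.perm_ext_iff_of_nodup (PySem.List.nodup_dedup _) hSBnd]
        intro c
        rw [PySem.List.mem_dedup, hSBmem]
        constructor
        · intro hcnl
          obtain ⟨x, hx, hfx⟩ := List.mem_map.mp hcnl
          by_cases hxJ : x = 'J'
          · rw [hxJ] at hfx; simp at hfx; rw [← hfx]; exact ⟨hmL, hmJ⟩
          · rw [if_neg hxJ] at hfx; rw [← hfx]; exact ⟨hx, hxJ⟩
        · rintro ⟨hcl, hcJ'⟩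
          exact List.mem_map.mpr ⟨c, hcl, by simp [hcJ']⟩
      rw [hAcongr, sortedRev_eq_of_perm _ _ (hpermA.map _)]
      -- B's sorted non-J values list is nonempty
      have hBne : PySem.List.sorted (SB.map (fun c => (l.count c : Int))) (fun v => v) true ≠ [] := by
        rw [Ne, PySem.List.sorted_eq_nil_iff, List.map_eq_nil_iff]
        exact fun h => absurd (h ▸ hcsSB) (List.not_mem_nil)
      obtain ⟨v0, t, hvt⟩ := List.exists_cons_of_ne_nil hBne
      rw [hvt]
      have hmaxSB : ∀ c ∈ SB, (l.count c : Int) ≤ (l.count (aMost l) : Int) := by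
        intro c hc
        obtain ⟨hcl, hcJ'⟩ := (hSBmem c).mp hc
        exact hmax c hcl hcJ'
      exact sorted_bump SB (fun c => (l.count c : Int)) (aMost l) (l.count 'J' : Int)
        hcsSB hSBnd (Int.natCast_nonneg _) hmaxSB hvt
  · -- no wild card
    have hcontains : l.contains 'J' = false := by simpa using hJ
    have hcount0 : ((l.count 'J' : Int) != 0) = false := by
      simp [List.count_eq_zero.mpr hJ]
    rw [hcount0, if_neg (by simp)]
    rw [aValues_noJ l hcontains, aCounter_values]
    apply sortedRev_eq_of_perm
    apply List.Perm.map
    rw [List.perm_ext_iff_of_nodup (PySem.List.nodup_dedup l) hSBnd]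
    intro c
    rw [PySem.List.mem_dedup, hSBmem]
    exact ⟨fun hc => ⟨hc, fun he => hJ (he ▸ hc)⟩, fun hc => hc.1⟩

-- ===== VERDICT (by name: the statement is the Claim_ definition above) =====
theorem categorize_hand_spec : Claim_equal_categorize_hand := by
  intro hand _ hpre
  unfold Spec_categorize_hand
  have halpha : ∀ c ∈ hand.toList, c ∈ order_character := by
    intro c hc
    have := List.all_eq_true.mp hpre.2 c hc
    simpa [order_character] using this
  rw [categorize_hand_eq_ladder, categorize_hand_alt_eq_ladder,
      values_eq _ hpre.1 halpha]
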